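-- pv_equiv track=rewrite | github.com/kaelmurphy/Soundex | Assign2.py | comparisonFunction
-- ===== SOURCE A (Python) =====
-- def comparisonFunction(x, y):
--     """this is the function where I will compare two given soundex encodings, if they are the same I will add both of
--     the names to a list and return the list """
--     namesList = y
--     soundexList = x
--     finalList = []
--     for i in range(len(soundexList)):
--         # changed the range around the bit, so it will only compare each two names once
--         for j in range(i, len(soundexList)):
--             # this ensures that I don't compare names to themselves
--             if j != i:
--                 # if the two words being compared are the same I send them to my final list
--                 if soundexList[i] == soundexList[j]:
--                     finalList.append('{} and {} have the same Soundex encoding.'.format(namesList[i], namesList[j]))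
--     return finalList
-- ===== SOURCE B (Python) =====
-- def comparisonFunction(x, y):
--     # Group indices by encoding in one dict pass; a per-encoding cursor then emits each
--     # clash pair once, in the same (i, j) order as the naive double scan.
--     groups = {}
--     for j, code in enumerate(x):
--         groups.setdefault(code, []).append(j)
--     pos = {}
--     finalList = []
--     for i, code in enumerate(x):
--         p = pos.get(code, 0) + 1
--         pos[code] = p
--         for j in groups[code][p:]:
--             finalList.append('{} and {} have the same Soundex encoding.'.format(y[i], y[j]))
--     return finalList
-- ===== Notes on version B (the rewrite author's own statement) =====
-- stated objective: alternative
-- what changed: Replaces the all-pairs double index scan with one dict pass grouping indices by encoding plus a per-encoding cursor that emits the clash pairs from each group's tail, in the same (i,j) order.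
import Mathlib
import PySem

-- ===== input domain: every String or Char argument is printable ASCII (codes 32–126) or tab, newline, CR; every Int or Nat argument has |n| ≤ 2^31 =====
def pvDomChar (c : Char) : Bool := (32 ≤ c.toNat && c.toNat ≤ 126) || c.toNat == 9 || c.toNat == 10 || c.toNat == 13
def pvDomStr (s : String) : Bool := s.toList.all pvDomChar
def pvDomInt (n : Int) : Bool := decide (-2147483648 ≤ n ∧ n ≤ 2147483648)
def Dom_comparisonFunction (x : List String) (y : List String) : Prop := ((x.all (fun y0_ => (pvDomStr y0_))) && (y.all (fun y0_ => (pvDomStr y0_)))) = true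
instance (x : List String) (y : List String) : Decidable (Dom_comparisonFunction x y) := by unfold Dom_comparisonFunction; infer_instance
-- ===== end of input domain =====

-- B restructures A's all-pairs double index scan into one dict pass grouping indices by
-- encoding plus a per-encoding cursor emitting each group's tail, in A's (i, j) order.

-- shared message builder ('{} and {} have the same Soundex encoding.'.format(a, b))
def pvFmt (a b : String) : String := a ++ " and " ++ b ++ " have the same Soundex encoding."

-- ===== PORT A =====
def comparisonFunction (x : List String) (y : List String) : List String :=
  let namesList := y
  let soundexList := x
  let finalList : List String := []
  (PySem.List.pyRange 0 (PySem.List.len soundexList)).foldl (fun acc i =>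
    (PySem.List.pyRange i (PySem.List.len soundexList)).foldl (fun acc j =>
      if j ≠ i then
        if PySem.List.pyGetD soundexList i "" = PySem.List.pyGetD soundexList j "" then
          acc ++ [pvFmt (PySem.List.pyGetD namesList i "") (PySem.List.pyGetD namesList j "")]
        else acc
      else acc) acc) finalList

-- ===== PORT B =====
def comparisonFunction_alt (x : List String) (y : List String) : List String :=
  -- one pass: encoding -> list of its indices (groups.setdefault(code, []).append(j))
  let groups : PySem.Dict String (List Int) :=
    (PySem.List.enumerate x).foldl
      (fun d p => d.modify p.2 [] (fun l => l ++ [p.1])) PySem.Dict.empty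
  -- second pass: per-encoding cursor pos; emit the group's tail past this occurrence
  let st := (PySem.List.enumerate x).foldl
    (fun (st : PySem.Dict String Int × List String) p =>
      let pp := st.1.getD p.2 0 + 1
      (st.1.insert p.2 pp,
       st.2 ++ (PySem.List.slice (groups.getD p.2 []) (some pp) none).map
         (fun j => pvFmt (PySem.List.pyGetD y p.1 "") (PySem.List.pyGetD y j ""))))
    (PySem.Dict.empty, ([] : List String))
  st.2

-- ===== PRECONDITION & SPEC =====
-- Pre_ excludes exactly the inputs where Python A raises IndexError (a matching pair of
-- encodings whose second index is out of range for y; B indexes y at the same spots).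
def Pre_comparisonFunction (x : List String) (y : List String) : Prop :=
  ∀ j < x.length, ∀ i < j, x.getD i "" = x.getD j "" → j < y.length
instance (x : List String) (y : List String) : Decidable (Pre_comparisonFunction x y) := by unfold Pre_comparisonFunction; infer_instance
def pvWitness_comparisonFunction : List String × List String := (["A1", "A1", "B2"], ["ann", "anna", "bob"])
def Spec_comparisonFunction (x : List String) (y : List String) (out : List String) : Prop := out = comparisonFunction_alt x y
instance (x : List String) (y : List String) (out : List String) : Decidable (Spec_comparisonFunction x y out) := by unfold Spec_comparisonFunction; infer_instance

-- ===== CLAIM (what is proved, stated in full; the proofs are below) =====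
def Claim_equal_comparisonFunction : Prop := ∀ (x : List String) (y : List String), Dom_comparisonFunction x y → Pre_comparisonFunction x y → Spec_comparisonFunction x y (comparisonFunction x y)

-- ===== LEMMAS AND PROOFS =====

-- indices carrying encoding c in x, in increasing order
def pvIdx (x : List String) (c : String) : List Nat :=
  (List.range x.length).filter (fun k => x.getD k "" == c)

-- how many of the first k entries of x carry encoding c
def pvCnt (x : List String) (k : Nat) (c : String) : Nat :=
  ((List.range k).filter (fun j => x.getD j "" == c)).length

-- the output block contributed by position i: its later matching partners
def pvBlk (x y : List String) (i : Nat) : List String :=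
  ((pvIdx x (x.getD i "")).drop (pvCnt x i (x.getD i "") + 1)).map
    (fun j => pvFmt (y.getD i "") (y.getD j ""))

lemma pvCnt_succ (x : List String) (k : Nat) (c : String) :
    pvCnt x (k + 1) c = pvCnt x k c + if x.getD k "" == c then 1 else 0 := by
  unfold pvCnt
  rw [List.range_succ, List.filter_append]
  by_cases h : x.getD k "" == c
  · simp only [List.filter, h]; simp
  · simp only [List.filter, h]; simp

lemma pvBlk_eq (x y : List String) (i : Nat) (hi : i < x.length) :
    pvBlk x y i = ((List.range' (i + 1) (x.length - (i + 1))).filter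
        (fun j => x.getD j "" == x.getD i "")).map (fun j => pvFmt (y.getD i "") (y.getD j "")) := by
  unfold pvBlk pvIdx
  have hsplit : List.range x.length = List.range (i + 1) ++ List.range' (i + 1) (x.length - (i + 1)) := by
    rw [List.range_eq_range', show x.length = (i + 1) + (x.length - (i + 1)) by omega,
      ← List.range'_append (s := 0) (m := i+1) (step := 1), List.range_eq_range']
    simp
  rw [hsplit, List.filter_append]
  have hlen : (List.filter (fun k => x.getD k "" == x.getD i "") (List.range (i + 1))).length
      = pvCnt x i (x.getD i "") + 1 := by
    have := pvCnt_succ x i (x.getD i "")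
    unfold pvCnt at this ⊢
    simp at this ⊢
    omega
  rw [← hlen, List.drop_left]

lemma pvRange_natCast (i n : Nat) :
    PySem.List.pyRange (i : Int) (n : Int) = (List.range' i (n - i)).map (fun k : Nat => (k : Int)) := by
  rw [PySem.List.pyRange_one, show ((n : Int) - (i : Int)).toNat = n - i by omega]
  apply List.ext_getElem
  · simp
  · intro k h1 h2
    simp [List.getElem_range']

-- A collects, for each i, exactly the block of later matching indices
lemma portA_eq_flatMap (x y : List String) :
    comparisonFunction x y = (List.range x.length).flatMap (pvBlk x y) := by
  unfold comparisonFunction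
  simp only [PySem.List.len_eq, PySem.List.pyRange_zero_natCast, List.foldl_map]
  have hbody : ∀ (acc : List String) (i : Nat), i < x.length →
      (PySem.List.pyRange (i : Int) (x.length : Int)).foldl (fun acc j =>
        if j ≠ (i : Int) then
          if PySem.List.pyGetD x (i : Int) "" = PySem.List.pyGetD x j "" then
            acc ++ [pvFmt (PySem.List.pyGetD y (i : Int) "") (PySem.List.pyGetD y j "")]
          else acc
        else acc) acc
      = acc ++ pvBlk x y i := by
    intro acc i hi
    rw [pvRange_natCast, List.foldl_map]
    have hr : List.range' i (x.length - i) = i :: List.range' (i + 1) (x.length - (i + 1)) := by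
      rw [show x.length - i = (x.length - (i + 1)) + 1 by omega, List.range'_succ]
    rw [hr, pvBlk_eq x y i hi]
    simp only [List.foldl_cons, ne_eq, not_true_eq_false, if_false]
    have key : ∀ (L : List Nat), (∀ a ∈ L, i < a) → ∀ (acc : List String),
        L.foldl (fun acc (j : Nat) =>
          if ((j : Int) ≠ (i : Int)) then
            if PySem.List.pyGetD x (i : Int) "" = PySem.List.pyGetD x (j : Int) "" then
              acc ++ [pvFmt (PySem.List.pyGetD y (i : Int) "") (PySem.List.pyGetD y (j : Int) "")]
            else acc
          else acc) acc
        = acc ++ (L.filter (fun j => x.getD j "" == x.getD i "")).map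
            (fun j => pvFmt (y.getD i "") (y.getD j "")) := by
      intro L
      induction L with
      | nil => simp
      | cons a l ih =>
        intro hL acc
        have ha : ((a : Int) ≠ (i : Int)) := by
          have := hL a (by simp)
          omega
        simp only [List.foldl_cons, List.filter_cons, if_pos ha]
        by_cases h : x.getD i "" = x.getD a ""
        · rw [if_pos (by simpa using h), if_pos (by simp [List.getD]; exact h.symm)]
          rw [ih (fun b hb => hL b (by simp [hb])) _]
          simp
        · rw [if_neg (by simpa using h), if_neg (by simp [List.getD]; exact fun hc => h hc.symm)]
          exact ih (fun b hb => hL b (by simp [hb])) acc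
    rw [key _ (by intro a hL; simp [List.mem_range'] at hL; omega) acc]
  rw [PySem.List.foldl_congr_mem _ _ (fun acc i => acc ++ pvBlk x y i) _
    (fun acc i hi => hbody acc i (List.mem_range.mp hi))]
  rw [PySem.List.foldl_append_eq_flatMap]
  simp

lemma enumerate_eq (x : List String) :
    PySem.List.enumerate x = (List.range x.length).map (fun k : Nat => ((k : Int), x.getD k "")) := by
  rw [PySem.List.enumerate_eq_map_pyRange x "", PySem.List.len_eq, PySem.List.pyRange_zero_natCast,
    List.map_map]
  exact List.map_congr_left (fun a _ => by simp [List.getD])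

-- the groups dict maps each encoding to its (cast) index list
lemma groups_getD (x : List String) (c : String) :
    ((PySem.List.enumerate x).foldl
      (fun d p => d.modify p.2 [] (fun l => l ++ [p.1])) PySem.Dict.empty).getD c []
    = (pvIdx x c).map (fun k : Nat => (k : Int)) := by
  have hswap : (PySem.List.enumerate x).foldl
      (fun d p => d.modify p.2 [] (fun l => l ++ [p.1])) (PySem.Dict.empty : PySem.Dict String (List Int))
      = ((PySem.List.enumerate x).map (fun p => (p.2, p.1))).foldl
        (fun d q => d.modify q.1 [] (fun l => l ++ [q.2])) PySem.Dict.empty := by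
    rw [List.foldl_map]
  rw [hswap, PySem.Dict.getD_foldl_modify_append]
  rw [enumerate_eq, List.map_map, List.filter_map, List.map_map]
  unfold pvIdx
  simp only [Function.comp_def, List.getD]
  rfl

-- B's cursor loop: pos counts earlier occurrences, so each step emits exactly pvBlk
lemma loopB (x y : List String) (G : String → List Int)
    (hG : ∀ c, G c = (pvIdx x c).map (fun k : Nat => (k : Int))) :
    ∀ (m k : Nat) (pos : PySem.Dict String Int) (acc : List String),
    (∀ c, pos.getD c 0 = (pvCnt x k c : Int)) →
    (((List.range' k m).foldl (fun (st : PySem.Dict String Int × List String) (i : Nat) =>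
      (st.1.insert (x.getD i "") (st.1.getD (x.getD i "") 0 + 1),
       st.2 ++ (PySem.List.slice (G (x.getD i "")) (some (st.1.getD (x.getD i "") 0 + 1)) none).map
         (fun j => pvFmt (y.getD i "") (PySem.List.pyGetD y j ""))))
      (pos, acc)).2 : List String)
    = acc ++ (List.range' k m).flatMap (pvBlk x y) := by
  intro m
  induction m with
  | zero => intro k pos acc h; simp
  | succ m ih =>
    intro k pos acc hpos
    rw [List.range'_succ, List.foldl_cons, List.flatMap_cons]
    have hslice : (PySem.List.slice (G (x.getD k "")) (some (pos.getD (x.getD k "") 0 + 1)) none).map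
         (fun j => pvFmt (y.getD k "") (PySem.List.pyGetD y j ""))
        = pvBlk x y k := by
      rw [hG, hpos, show ((pvCnt x k (x.getD k "") : Int) + 1) = ((pvCnt x k (x.getD k "") + 1 : Nat) : Int) by push_cast; ring,
        PySem.List.slice_from_natCast, ← List.map_drop, List.map_map]
      unfold pvBlk
      exact List.map_congr_left (fun a _ => by simp)
    rw [hslice]
    rw [ih (k+1) _ _ ?_]
    · simp
    · intro c
      rw [PySem.Dict.getD_insert, hpos, hpos, pvCnt_succ]
      by_cases hc : c = x.getD k ""
      · rw [if_pos hc, hc]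
        simp
      · rw [if_neg hc]
        have : (x.getD k "" == c) = false := by simp [List.getD] at *; exact fun h => hc h.symm
        rw [this]
        simp

lemma portB_eq_flatMap (x y : List String) :
    comparisonFunction_alt x y = (List.range x.length).flatMap (pvBlk x y) := by
  unfold comparisonFunction_alt
  dsimp only
  have hG : ∀ c, ((PySem.List.enumerate x).foldl
      (fun d p => d.modify p.2 [] (fun l => l ++ [p.1])) PySem.Dict.empty).getD c []
      = (pvIdx x c).map (fun k : Nat => (k : Int)) := groups_getD x
  generalize hGdef : (PySem.List.enumerate x).foldl
      (fun d p => d.modify p.2 [] (fun l => l ++ [p.1])) (PySem.Dict.empty : PySem.Dict String (List Int)) = Gd at hG ⊢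
  rw [enumerate_eq, List.foldl_map]
  simp only [PySem.List.pyGetD_natCast]
  rw [List.range_eq_range']
  rw [loopB x y (fun c => Gd.getD c []) (fun c => hG c) x.length 0 _ _ (fun c => by simp [pvCnt, PySem.Dict.getD_empty])]
  simp

-- ===== VERDICT (by name: the statement is the Claim_ definition above) =====
theorem comparisonFunction_spec : Claim_equal_comparisonFunction := by
  intro x y _ _
  unfold Spec_comparisonFunction
  rw [portA_eq_flatMap, portB_eq_flatMap]
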